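-- pv_equiv track=rewrite | github.com/Tacocat405583/cs121-crawler | duplicate_detection.py | partition_checksum
-- ===== SOURCE A (Python) =====
-- NUM_PARTITIONS = 2
--
-- WIDTH = 8
--
-- def partition_checksum(text: str) -> int:
--     text_partitions = [0] * NUM_PARTITIONS
--     for idx, char in enumerate(text):
--         text_partitions[idx % NUM_PARTITIONS] += (ord(char) ^ (idx + 1)) * (idx + 1)
--
--     parsed_hash = ""
--     for i in range(NUM_PARTITIONS):
--         parsed_hash += f"{text_partitions[i]:0{WIDTH}d}"
--
--     return int(parsed_hash)
-- ===== SOURCE B (Python) =====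
-- NUM_PARTITIONS = 2
--
-- WIDTH = 8
--
-- def partition_checksum(text: str) -> int:
--     # XOR-free reformulation: since x ^ w = x + w - 2 * (x & w) for nonnegative
--     # ints, each partition value is the sum of three simple series over the
--     # (code, weight) pairs of that partition, computed as separate sums.
--     parsed_hash = ""
--     for k in range(NUM_PARTITIONS):
--         pairs = [(ord(c), i + 1) for i, c in enumerate(text) if i % NUM_PARTITIONS == k]
--         lin = sum(o * w for o, w in pairs)
--         sq = sum(w * w for _, w in pairs)
--         car = sum((o & w) * w for o, w in pairs)
--         parsed_hash += f"{lin + sq - 2 * car:0{WIDTH}d}"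
--     return int(parsed_hash)
-- ===== Notes on version B (the rewrite author's own statement) =====
-- stated objective: alternative
-- what changed: Removes the XOR and the idx%2-dispatched partition list: for each partition B collects its (code, weight) pairs with a filtered comprehension and computes the partition value as three separate plain sums lin + sq - 2*car, using the identity x ^ w = x + w - 2*(x & w) for nonnegative ints.
import Mathlib
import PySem

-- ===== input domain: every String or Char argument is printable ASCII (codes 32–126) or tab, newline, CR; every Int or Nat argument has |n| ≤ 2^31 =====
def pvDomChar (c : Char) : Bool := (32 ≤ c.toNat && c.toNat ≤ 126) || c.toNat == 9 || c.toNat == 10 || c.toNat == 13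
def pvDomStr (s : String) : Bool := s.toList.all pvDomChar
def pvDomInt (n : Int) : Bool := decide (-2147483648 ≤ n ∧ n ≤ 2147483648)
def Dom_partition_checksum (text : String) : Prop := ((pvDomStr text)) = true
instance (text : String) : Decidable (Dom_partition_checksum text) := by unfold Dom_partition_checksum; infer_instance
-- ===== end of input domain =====

-- B eliminates the XOR and the modulo-dispatched partition list: each partition's (code, weight)
-- pairs are collected by a filtered comprehension and its value computed as three plain sums via
-- x ^ w = x + w - 2*(x & w) (alternative decomposition, same cost).


-- ===== PORT A =====
-- f"{n:08d}": zero-pad str(n) to width 8 (exact for 0 ≤ n, the only values that occur: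
-- every summand (ord(c) ^ (idx+1)) * (idx+1) is a product of two nonnegative ints)
def pvPad8 (n : Int) : List Char :=
  let s := PySem.Int.toChars n
  List.replicate (8 - s.length) '0' ++ s

-- int(s); here s is always a nonempty string of digits, so ofChars? is some and getD never fires
def pvInt (cs : List Char) : Int := (PySem.Int.ofChars? cs).getD 0

-- text_partitions[i] += v; the index i = idx % 2 is always in range for the 2-element list
def pvBump (tp : List Int) (i : Nat) (v : Int) : List Int := tp.set i (tp.getD i 0 + v)

-- the 'for idx, char in enumerate(text)' loop, with its partition-list state
def pvLoopA (ps : List (Int × Char)) (tp : List Int) : List Int :=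
  ps.foldl (fun tp p =>
    pvBump tp (PySem.Int.mod p.1 2).toNat ((PySem.Int.bxor (p.2.toNat : Int) (p.1 + 1)) * (p.1 + 1))) tp

def partition_checksum (text : String) : Int :=
  let tp := pvLoopA (PySem.List.enumerate text.toList 0) [0, 0]
  let parsed := (PySem.List.pyRange 0 2 1).foldl
    (fun acc i => acc ++ pvPad8 (PySem.List.pyGetD tp i 0)) ([] : List Char)
  pvInt parsed

-- ===== PORT B =====
-- '[(ord(c), i + 1) for i, c in enumerate(text) if i % NUM_PARTITIONS == k]'
def pvTermPairs (cs : List Char) (k : Int) : List (Int × Int) :=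
  ((PySem.List.enumerate cs 0).filter (fun p => PySem.Int.mod p.1 2 == k)).map
    (fun p => ((p.2.toNat : Int), p.1 + 1))

-- the 'for k in range(NUM_PARTITIONS)' loop of Source B: filtered pairs, three separate sums,
-- the partition value lin + sq - 2*car appended as f"{...:08d}"
def partition_checksum_alt (text : String) : Int :=
  let parsed := (PySem.List.pyRange 0 2 1).foldl (fun acc k =>
    let pairs := pvTermPairs text.toList k
    let lin := (pairs.map (fun p => p.1 * p.2)).sum
    let sq := (pairs.map (fun p => p.2 * p.2)).sum
    let car := (pairs.map (fun p => PySem.Int.band p.1 p.2 * p.2)).sum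
    acc ++ pvPad8 (lin + sq - 2 * car)) ([] : List Char)
  pvInt parsed

-- ===== PRECONDITION & SPEC =====
def Spec_partition_checksum (text : String) (out : Int) : Prop := out = partition_checksum_alt text
instance (text : String) (out : Int) : Decidable (Spec_partition_checksum text out) := by unfold Spec_partition_checksum; infer_instance

-- ===== CLAIM (what is proved, stated in full; the proofs are below) =====
def Claim_equal_partition_checksum : Prop := ∀ (text : String), Dom_partition_checksum text → Spec_partition_checksum text (partition_checksum text)

-- ===== LEMMAS AND PROOFS =====

-- the XOR term of A, and the per-partition sum of those terms over an enumerated list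
def pvTerm (p : Int × Char) : Int := (PySem.Int.bxor (p.2.toNat : Int) (p.1 + 1)) * (p.1 + 1)
def pvS (l : List (Int × Char)) (k : Int) : Int :=
  ((l.filter (fun p => PySem.Int.mod p.1 2 == k)).map pvTerm).sum

lemma pvBump_zero (x y v : Int) : pvBump [x, y] 0 v = [x + v, y] := rfl
lemma pvBump_one (x y v : Int) : pvBump [x, y] 1 v = [x, y + v] := rfl

-- (m &&& n) % 2 only sees the last bits
lemma pv_and_mod_two (m n : ℕ) : (m &&& n) % 2 = (m % 2) &&& (n % 2) := by
  rcases Nat.mod_two_eq_zero_or_one m with hm | hm <;>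
  rcases Nat.mod_two_eq_zero_or_one n with hn | hn <;>
  · have hb := Nat.testBit_and m n 0
    simp only [Nat.testBit_zero] at hb
    rcases Nat.mod_two_eq_zero_or_one (m &&& n) with h | h <;> simp_all

-- the carry identity (m ^ n) + 2*(m & n) = m + n, by fuel induction on the bits
lemma pv_xor_add_and : ∀ (s m n : ℕ), m + n ≤ s → (m ^^^ n) + 2 * (m &&& n) = m + n := by
  intro s
  induction s with
  | zero =>
    intro m n h
    have hm : m = 0 := by omega
    have hn : n = 0 := by omega
    subst hm; subst hn; decide
  | succ s ih =>
    intro m n h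
    rcases Nat.eq_zero_or_pos m with hm0 | hm0
    · simp [hm0]
    rcases Nat.eq_zero_or_pos n with hn0 | hn0
    · simp [hn0]
    have hrec := ih (m / 2) (n / 2) (by omega)
    have hx : (m ^^^ n) / 2 = m / 2 ^^^ n / 2 := Nat.xor_div_two
    have ha : (m &&& n) / 2 = m / 2 &&& n / 2 := Nat.and_div_two
    have hxm : (m ^^^ n) % 2 = (m + n) % 2 := Nat.xor_mod_two_eq
    have ham : (m &&& n) % 2 = (m % 2) &&& (n % 2) := pv_and_mod_two m n
    rcases Nat.mod_two_eq_zero_or_one m with hm | hm <;>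
      rcases Nat.mod_two_eq_zero_or_one n with hn | hn <;>
      rw [hm, hn] at ham <;>
      [skip; skip; skip; skip] <;>
      · first
        | (have hb : (m &&& n) % 2 = 0 := by rw [ham]; decide
           omega)
        | (have hb : (m &&& n) % 2 = 1 := by rw [ham]; decide
           omega)

-- the XOR-free form of one term (both operands nonnegative here)
lemma pv_bxor_eq (a b : Int) (ha : 0 ≤ a) (hb : 0 ≤ b) :
    PySem.Int.bxor a b = a + b - 2 * PySem.Int.band a b := by
  rw [PySem.Int.bxor_of_nonneg ha hb, PySem.Int.band_of_nonneg ha hb]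
  have := pv_xor_add_and (a.toNat + b.toNat) a.toNat b.toNat le_rfl
  omega

-- indices produced by enumerate are ≥ the start index
lemma pv_enum_ge : ∀ (cs : List Char) (s : Int), ∀ p ∈ PySem.List.enumerate cs s, s ≤ p.1 := by
  intro cs
  induction cs with
  | nil => intro s p hp; simp [PySem.List.enumerate_nil] at hp
  | cons c t iht =>
    intro s p hp
    rw [PySem.List.enumerate_cons] at hp
    rcases List.mem_cons.mp hp with hp | hp
    · simp [hp]
    · have := iht (s + 1) p hp; omega

-- A's interleaved dispatch loop computes exactly the two filtered partition sums
lemma pv_loopA_eq : ∀ (l : List (Int × Char)) (x y : Int),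
    pvLoopA l [x, y] = [x + pvS l 0, y + pvS l 1] := by
  intro l
  induction l with
  | nil => intro x y; simp [pvLoopA, pvS]
  | cons p t iht =>
    intro x y
    have h2 : (0:Int) < 2 := by norm_num
    have hge := PySem.Int.mod_nonneg p.1 h2
    have hlt := PySem.Int.mod_lt p.1 h2
    have hunf : pvLoopA (p :: t) [x, y]
        = pvLoopA t (pvBump [x, y] (PySem.Int.mod p.1 2).toNat (pvTerm p)) := rfl
    rcases (by omega : PySem.Int.mod p.1 2 = 0 ∨ PySem.Int.mod p.1 2 = 1) with hm | hm
    · have h0 : pvS (p :: t) 0 = pvTerm p + pvS t 0 := by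
        unfold pvS
        rw [List.filter_cons]
        rw [hm]
        simp
      have h1 : pvS (p :: t) 1 = pvS t 1 := by
        unfold pvS
        rw [List.filter_cons]
        rw [hm]
        simp
      rw [hunf, hm]
      simp only [Int.toNat_zero, pvBump_zero]
      rw [iht (x + pvTerm p) y, h0, h1]
      simp [add_assoc]
    · have h0 : pvS (p :: t) 0 = pvS t 0 := by
        unfold pvS
        rw [List.filter_cons]
        rw [hm]
        simp
      have h1 : pvS (p :: t) 1 = pvTerm p + pvS t 1 := by
        unfold pvS
        rw [List.filter_cons]
        rw [hm]
        simp
      rw [hunf, hm]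
      simp only [Int.toNat_one, pvBump_one]
      rw [iht x (y + pvTerm p), h0, h1]
      simp [add_assoc]

-- three plain sums recombine pointwise into the XOR sum (all pairs nonnegative)
lemma pv_three_sums : ∀ (l : List (Int × Int)), (∀ p ∈ l, 0 ≤ p.1 ∧ 0 ≤ p.2) →
    (l.map (fun p => p.1 * p.2)).sum + (l.map (fun p => p.2 * p.2)).sum
      - 2 * (l.map (fun p => PySem.Int.band p.1 p.2 * p.2)).sum
    = (l.map (fun p => PySem.Int.bxor p.1 p.2 * p.2)).sum := by
  intro l
  induction l with
  | nil => intro _; simp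
  | cons p t iht =>
    intro h
    have hp := h p (by simp)
    have ht := iht (fun q hq => h q (by simp [hq]))
    have hx : PySem.Int.bxor p.1 p.2 * p.2
        = p.1 * p.2 + p.2 * p.2 - 2 * (PySem.Int.band p.1 p.2 * p.2) := by
      rw [pv_bxor_eq p.1 p.2 hp.1 hp.2]; ring
    simp only [List.map_cons, List.sum_cons]
    rw [hx]; linarith

-- B's per-partition value equals the filtered XOR sum over the enumeration
lemma pv_alt_part_eq (cs : List Char) (k : Int) :
    ((pvTermPairs cs k).map (fun p => p.1 * p.2)).sum
      + ((pvTermPairs cs k).map (fun p => p.2 * p.2)).sum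
      - 2 * ((pvTermPairs cs k).map (fun p => PySem.Int.band p.1 p.2 * p.2)).sum
    = pvS (PySem.List.enumerate cs 0) k := by
  have hnn : ∀ p ∈ pvTermPairs cs k, 0 ≤ p.1 ∧ 0 ≤ p.2 := by
    intro p hp
    simp only [pvTermPairs, List.mem_map, List.mem_filter] at hp
    obtain ⟨q, ⟨hq, _⟩, rfl⟩ := hp
    have := pv_enum_ge cs 0 q hq
    exact ⟨Int.natCast_nonneg _, by omega⟩
  rw [pv_three_sums _ hnn]
  simp only [pvTermPairs, List.map_map, pvS]
  rfl

-- ===== VERDICT (by name: the statement is the Claim_ definition above) =====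
theorem partition_checksum_spec : Claim_equal_partition_checksum := by
  intro text _
  unfold Spec_partition_checksum partition_checksum partition_checksum_alt
  have hA := pv_loopA_eq (PySem.List.enumerate text.toList 0) 0 0
  rw [hA]
  have hr : PySem.List.pyRange 0 2 1 = [0, 1] := by decide
  rw [hr]
  simp only [List.foldl_cons, List.foldl_nil, List.nil_append]
  rw [pv_alt_part_eq text.toList 0, pv_alt_part_eq text.toList 1]
  simp [PySem.List.pyGetD]
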